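-- pv_equiv track=rewrite | github.com/Rainbow42/get_fib_interval | fib.py | get_fib_interval
-- ===== SOURCE A (Python) =====
-- from typing import List
--
-- def get_fib_interval(n: int) -> List[int]:
--     """
--     :param n: Входное число, для которого требуется подсчитать последовательность фибоначчи и найти интервал
--     :return: возвращает интервал
--     """
--     if n <= 0:
--         raise
--
--     el_fib_1, el_fib_2 = 0, 1
--     # before_last
--     before_last = 0  # сохранения промежуточного результата числа фибоначчи res -2
--     last_res = 0  # сохранения предыдущего результата числа фибоначчи res - 1
--     # так как для n не нужно вычислять конец последовательности фибоначчи,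
--     # но гарантировано приходится увеличивать n + 1, если n < 6
--     # так как если n = 3, то краем интервала будет 2 и т.п.
--     tmp = n
--     res = 0
--
--     if n < 6:
--         n += 1
--
--     for _ in range(n):
--         res = el_fib_1 + el_fib_2
--
--         if res > tmp:
--             # первый же промежуточный результат будет концом интервала
--             if last_res == tmp:
--                 return [before_last, res]
--             return [last_res, res]
--         before_last, last_res = last_res, res
--         el_fib_1, el_fib_2 = el_fib_2, res
--     return [last_res, res]
-- ===== SOURCE B (Python) =====
-- from typing import List
--
-- def get_fib_interval(n: int) -> List[int]:
--     if n <= 0: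
--         raise
--
--     # pass 1: build the Fibonacci values 1, 2, 3, 5, ... until the last one exceeds n
--     fibs = [1]
--     a, b = 1, 2
--     while fibs[-1] <= n:
--         fibs.append(b)
--         a, b = b, a + b
--
--     # pass 2: locate the first value strictly greater than n and its two predecessors
--     i = next(k for k, v in enumerate(fibs) if v > n)
--     upper = fibs[i]
--     last_res = fibs[i - 1] if i >= 1 else 0
--     before_last = fibs[i - 2] if i >= 2 else 0
--     return [before_last, upper] if last_res == n else [last_res, upper]
-- ===== Notes on version B (the rewrite author's own statement) =====
-- stated objective: alternative
-- what changed: A's single counted for-loop (range(n) with the n<6 fuel tweak, early returns and five rolling variables) is replaced by two passes: build the Fibonacci list 1,2,3,5,... once until it exceeds n, then locate the bracketing elements by index in a separate scan.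
import Mathlib
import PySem

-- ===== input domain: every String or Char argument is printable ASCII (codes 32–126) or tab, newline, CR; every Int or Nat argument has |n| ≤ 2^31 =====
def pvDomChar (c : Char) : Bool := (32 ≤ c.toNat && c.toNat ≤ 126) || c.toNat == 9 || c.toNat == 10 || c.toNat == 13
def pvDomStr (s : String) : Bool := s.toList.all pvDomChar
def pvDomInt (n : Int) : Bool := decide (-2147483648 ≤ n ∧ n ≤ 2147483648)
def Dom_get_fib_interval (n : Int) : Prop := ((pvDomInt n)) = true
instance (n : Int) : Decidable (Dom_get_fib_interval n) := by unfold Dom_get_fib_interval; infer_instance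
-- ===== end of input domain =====

-- B replaces A's single counted loop (with its early returns and the n<6 fuel tweak) by two passes:
-- build the Fibonacci list once, then look the bracketing elements up by index; objective: alternative.

-- ===== PORT A =====
-- the 'for _ in range(n)' loop of A: state (before_last, last_res, el_fib_1, el_fib_2, res)
def loopA (fuel : Nat) (tmp bl lr e1 e2 res : Int) : List Int :=
  match fuel with
  | 0 => [lr, res]                     -- fall-through 'return [last_res, res]'
  | f + 1 =>
    let r := e1 + e2
    if r > tmp then
      (if lr = tmp then [bl, r] else [lr, r])
    else loopA f tmp lr r e2 r r

def get_fib_interval (n : Int) : List Int :=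
  -- 'if n <= 0: raise' is excluded by Pre_get_fib_interval
  let tmp := n
  let n2 := if n < 6 then n + 1 else n
  loopA n2.toNat tmp 0 0 0 1 0

-- ===== PORT B =====
-- the 'while fibs[-1] <= n' loop of B; fuel only makes it total (n iterations always
-- suffice: the appended values grow by at least 1 per step)
def buildB (fuel : Nat) (n a b : Int) (fibs : List Int) : List Int :=
  match fuel with
  | 0 => fibs
  | f + 1 =>
    if ((PySem.List.pyGet? fibs (-1)).getD 0) ≤ n then
      buildB f n b (a + b) (fibs ++ [b])
    else fibs

-- second pass of B: first index whose value exceeds n, then the two predecessors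
def finishB (n : Int) (fibs : List Int) : List Int :=
  match fibs.findIdx? (fun v => decide (v > n)) with
  | none => []                         -- unreachable: the built list always ends above n
  | some i =>
    let upper := fibs.getD i 0
    let last_res := if 1 ≤ i then fibs.getD (i - 1) 0 else 0
    let before_last := if 2 ≤ i then fibs.getD (i - 2) 0 else 0
    if last_res = n then [before_last, upper] else [last_res, upper]

def get_fib_interval_alt (n : Int) : List Int :=
  finishB n (buildB (n.toNat + 1) n 1 2 [1])

-- ===== PRECONDITION & SPEC =====
-- Pre_ excludes exactly n ≤ 0, where A executes the bare 'raise' (RuntimeError)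
def Pre_get_fib_interval (n : Int) : Prop := 1 ≤ n
instance (n : Int) : Decidable (Pre_get_fib_interval n) := by unfold Pre_get_fib_interval; infer_instance
def pvWitness_get_fib_interval : Int := 7

def Spec_get_fib_interval (n : Int) (out : List Int) : Prop := out = get_fib_interval_alt n
instance (n : Int) (out : List Int) : Decidable (Spec_get_fib_interval n out) := by unfold Spec_get_fib_interval; infer_instance

-- ===== CLAIM (what is proved, stated in full; the proofs are below) =====
def Claim_equal_get_fib_interval : Prop := ∀ (n : Int), Dom_get_fib_interval n → Pre_get_fib_interval n → Spec_get_fib_interval n (get_fib_interval n)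

-- ===== LEMMAS AND PROOFS =====

lemma loopA_succ (f : Nat) (tmp bl lr e1 e2 res : Int) :
    loopA (f + 1) tmp bl lr e1 e2 res =
      (if e1 + e2 > tmp then (if lr = tmp then [bl, e1 + e2] else [lr, e1 + e2])
       else loopA f tmp lr (e1 + e2) e2 (e1 + e2) (e1 + e2)) := rfl

lemma buildB_succ (f : Nat) (n a b : Int) (fibs : List Int) :
    buildB (f + 1) n a b fibs =
      (if ((PySem.List.pyGet? fibs (-1)).getD 0) ≤ n then
        buildB f n b (a + b) (fibs ++ [b]) else fibs) := rfl

-- once the last element already exceeds n, buildB returns its list unchanged whatever the fuel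
lemma buildB_stop (f : Nat) (n a b : Int) (fibs : List Int)
    (h : n < (PySem.List.pyGet? fibs (-1)).getD 0) :
    buildB f n a b fibs = fibs := by
  cases f with
  | zero => rfl
  | succ f => simp [buildB]; omega

lemma findIdx_spec (n x y s : Int) (pre : List Int)
    (hpre : ∀ u ∈ pre, u ≤ n) (hx : x ≤ n) (hy : y ≤ n) (hs : n < s) :
    (pre ++ [x, y, s]).findIdx? (fun v => decide (v > n)) = some (pre.length + 2) := by
  induction pre with
  | nil => simp [List.findIdx?_cons, show ¬ (n < x) by omega, show ¬ (n < y) by omega, hs]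
  | cons u pre ih =>
    have hu : u ≤ n := hpre u (by simp)
    have := ih (fun v hv => hpre v (by simp [hv]))
    simp [List.findIdx?_cons, show ¬ (n < u) by omega, this]

lemma finishB_spec (n x y s : Int) (pre : List Int)
    (hpre : ∀ u ∈ pre, u ≤ n) (hx : x ≤ n) (hy : y ≤ n) (hs : n < s) :
    finishB n (pre ++ [x, y, s]) = if y = n then [x, s] else [y, s] := by
  unfold finishB
  rw [findIdx_spec n x y s pre hpre hx hy hs]
  have h2 : pre.length + 2 - 2 = pre.length := by omega
  have h1 : pre.length + 2 - 1 = pre.length + 1 := by omega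
  simp only [h1, h2]
  have gd : ∀ (k : Nat), (pre ++ [x, y, s]).getD (pre.length + k) 0 = ([x, y, s]).getD k 0 := by
    intro k; simp [List.getD, List.getElem?_append_right]
  have gx : (pre ++ [x, y, s]).getD pre.length 0 = x := by simpa using gd 0
  simp [gd, gx]

-- main synchronisation: B's build-then-scan equals A's loop from the common state (x, y)
lemma main_lemma : ∀ (fA fB : Nat) (n x y : Int) (pre : List Int),
    (∀ u ∈ pre, u ≤ n) → 1 ≤ x → x < y → y ≤ n →
    1 ≤ fA → n + 4 - (x + y) ≤ 2 * (fA : Int) →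
    1 ≤ fB → n + 4 - (x + y) ≤ 2 * (fB : Int) →
    finishB n (buildB fB n y (x + y) (pre ++ [x, y])) = loopA fA n x y x y y := by
  intro fA
  induction fA with
  | zero => intro fB n x y pre _ _ _ _ hA1 _ _ _; omega
  | succ fA ih =>
    intro fB n x y pre hpre hx hxy hy _ hA2 hB1 hB2
    obtain ⟨fB', rfl⟩ : ∃ fB', fB = fB' + 1 := ⟨fB - 1, by omega⟩
    have hlast : ((PySem.List.pyGet? ((pre ++ [x]) ++ [y]) (-1)).getD 0) = y := by
      rw [PySem.List.pyGet?_neg_one_append_singleton]; rfl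
    have hshape : pre ++ [x, y] = (pre ++ [x]) ++ [y] := by simp
    by_cases hr : x + y > n
    · -- A returns now; B appends x+y once more, then stops and scans
      have : buildB (fB' + 1) n y (x + y) (pre ++ [x, y]) = pre ++ [x, y, x + y] := by
        rw [buildB]
        rw [hshape, hlast]
        simp only [if_pos hy]
        rw [buildB_stop]
        · simp
        · rw [show (pre ++ [x]) ++ [y] ++ [x + y] = ((pre ++ [x]) ++ [y]) ++ [x + y] by simp,
            PySem.List.pyGet?_neg_one_append_singleton]
          simpa using hr
      rw [this, finishB_spec n x y (x + y) pre hpre (by omega) hy hr]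
      rw [loopA_succ]
      simp only [gt_iff_lt, if_pos hr]
    · -- both continue one step
      rw [not_lt] at hr
      have step : buildB (fB' + 1) n y (x + y) (pre ++ [x, y])
          = buildB fB' n (x + y) (y + (x + y)) ((pre ++ [x]) ++ [y, x + y]) := by
        rw [buildB, hshape, hlast]
        simp only [if_pos hy]
        congr 1
        simp
      rw [step]
      have ihres := ih fB' n y (x + y) (pre ++ [x])
        (by intro u hu; rcases List.mem_append.mp hu with h | h
            · exact hpre u h
            · simp at h; omega)
        (by omega) (by omega) hr (by omega) (by push_cast; omega) (by omega) (by push_cast; omega)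
      rw [ihres, loopA_succ]
      simp only [gt_iff_lt, show ¬ (n < x + y) by omega, if_neg, if_false]

-- small n (1..5) are checked by evaluation; n ≥ 6 goes through main_lemma
lemma equal_of_ge_six (n : Int) (hn : 6 ≤ n) :
    get_fib_interval n = get_fib_interval_alt n := by
  unfold get_fib_interval get_fib_interval_alt
  simp only [show ¬ (n < 6) by omega, if_neg, if_false]
  -- unroll A's first two iterations
  obtain ⟨m, hm⟩ : ∃ m : Nat, n.toNat = m + 3 := ⟨n.toNat - 3, by omega⟩
  have hmn : (m : Int) = n - 3 := by omega
  rw [hm, show m + 3 = (m + 1) + 1 + 1 by omega]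
  rw [loopA_succ]; simp only [gt_iff_lt, show ¬ (n < 0 + 1) by omega, if_false, if_neg]
  rw [loopA_succ]; simp only [gt_iff_lt, show ¬ (n < 1 + 1) by omega, if_false, if_neg]
  -- A is now loopA (m+1) n (0+1) (1+1) 1 (1+1) (1+1); unroll B's first iteration
  rw [buildB_succ]
  have h1 : ((PySem.List.pyGet? [(1 : Int)] (-1)).getD 0) = 1 := by decide
  rw [h1]
  simp only [show (1 : Int) ≤ n by omega, if_pos, if_true]
  have key := main_lemma (fA := m + 1) (fB := m + 3) (n := n) (x := 1) (y := 2) (pre := [])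
    (by simp) (by omega) (by omega) (by omega) (by omega) (by push_cast; omega)
    (by omega) (by push_cast; omega)
  norm_num at key ⊢
  rw [if_neg (by omega : ¬ (n ≤ 1))]
  exact key.symm

-- ===== VERDICT (by name: the statement is the Claim_ definition above) =====
theorem get_fib_interval_spec : Claim_equal_get_fib_interval := by
  intro n _ hpre
  unfold Spec_get_fib_interval
  unfold Pre_get_fib_interval at hpre
  by_cases h6 : 6 ≤ n
  · exact equal_of_ge_six n h6
  · interval_cases n <;> decide
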